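-- pv_equiv track=rewrite | github.com/sriramb2000/CM122-S21 | projects/HP2/basic_hasher.py | DC3_check_radix
-- ===== SOURCE A (Python) =====
-- def DC3_check_radix(sortedtuplst):
--     """
--     Determines whether or not we need to recurse with R'
--     Input:
--         sortedtuplst    - result from running DC3_radixsort
--     Output:
--         flag    - True if we need to recurse with DC3 on R' (duplicates found)
--                 - False if all characters are different, no need to recurse
-- sortedsamranks  - a list of ranks mapping on the same indices to sortedsamlst
--         indexrankmap    - a dictionary mapping original suffix index to its rank
--         checked - a dictionary of samnumlist:rank, {(1,2,3):1,(2,3,4):2,...}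
--     """
--     checked = {}
--     indexrankmap = {}
--     rank = 1
--     flag = False
--     # rank samples from the radix-sorted list of tuples
--     for samnumtuple in sortedtuplst:
--         samnumlst = samnumtuple[0]  # extract numlst from tuple
--         sufindex = samnumtuple[1]   # index of suffix from original string
--         samnumlst = tuple(samnumlst)    # need immutable keys
--         # sample is unique
--         if samnumlst not in checked:
--             checked[samnumlst] = rank
--             #sortedsamranks.append(rank)
--             indexrankmap[sufindex] = rank
--             rank += 1
--         # sample is a repeat
--         else:
--             flag = True
--             #sortedsamranks.append(checked[samnumlst])
--             indexrankmap[sufindex] = checked[samnumlst] # rank tie, use from table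
--     return flag, indexrankmap, checked
-- ===== SOURCE B (Python) =====
-- def DC3_check_radix(sortedtuplst):
--     # Deduplicate the sample keys once, keeping first occurrences in order:
--     # a key's rank is simply 1 + its position in that deduplicated list.
--     uniq = list(dict.fromkeys(tuple(t[0]) for t in sortedtuplst))
--     flag = len(uniq) != len(sortedtuplst)
--     checked = {k: i + 1 for i, k in enumerate(uniq)}
--     indexrankmap = {t[1]: uniq.index(tuple(t[0])) + 1 for t in sortedtuplst}
--     return flag, indexrankmap, checked
-- ===== Notes on version B (the rewrite author's own statement) =====
-- stated objective: alternative
-- what changed: Replaces A's single stateful loop (incremental rank counter, flag, two dicts maintained together) by a dedup-then-rank-by-position algorithm: first-occurrence deduplication of the keys (dict.fromkeys), flag from a length comparison, ranks recovered as 1 + position of the key in the deduplicated list (list.index).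
import Mathlib
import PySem

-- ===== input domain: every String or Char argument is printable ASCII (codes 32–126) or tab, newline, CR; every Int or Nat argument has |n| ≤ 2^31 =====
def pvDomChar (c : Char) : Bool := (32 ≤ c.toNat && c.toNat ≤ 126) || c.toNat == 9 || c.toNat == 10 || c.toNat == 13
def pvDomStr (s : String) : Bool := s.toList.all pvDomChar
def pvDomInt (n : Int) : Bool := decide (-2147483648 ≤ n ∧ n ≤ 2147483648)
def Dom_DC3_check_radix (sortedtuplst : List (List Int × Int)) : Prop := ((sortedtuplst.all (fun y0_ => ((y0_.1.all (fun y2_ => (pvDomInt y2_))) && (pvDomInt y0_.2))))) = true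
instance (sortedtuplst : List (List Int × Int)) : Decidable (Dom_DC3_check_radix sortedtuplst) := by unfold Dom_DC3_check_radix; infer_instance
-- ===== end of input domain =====

-- B replaces A's single stateful ranking loop by dedup-then-rank-by-position
-- (first-occurrence dedup, flag from a length comparison, ranks via list position);
-- alternative decomposition, return value equivalence only.

-- ===== PORT A =====
-- the loop body of A's single for-loop (state: checked, indexrankmap, rank, flag)
def stepA (st : PySem.Dict (List Int) Int × PySem.Dict Int Int × Int × Bool)
    (t : List Int × Int) : PySem.Dict (List Int) Int × PySem.Dict Int Int × Int × Bool :=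
  if st.1.contains t.1 = false then
    (st.1.insert t.1 st.2.2.1, st.2.1.insert t.2 st.2.2.1, st.2.2.1 + 1, st.2.2.2)
  else
    (st.1, st.2.1.insert t.2 (st.1.getD t.1 0), st.2.2.1, true)

def DC3_check_radix (sortedtuplst : List (List Int × Int)) : Bool × (List (Int × Int)) × (List (List Int × Int)) :=
  let st := sortedtuplst.foldl stepA (PySem.Dict.empty, PySem.Dict.empty, 1, false)
  (st.2.2.2, st.2.1.items, st.1.items)

-- ===== PORT B =====
-- uniq = list(dict.fromkeys(tuple(t[0]) for t in sortedtuplst)); ranks = 1 + position in uniq.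
-- uniq.index never raises here (every key is in uniq by construction), so .getD 0 is exact.
def DC3_check_radix_alt (sortedtuplst : List (List Int × Int)) : Bool × (List (Int × Int)) × (List (List Int × Int)) :=
  let uniq := PySem.List.dedup (sortedtuplst.map (fun t => t.1))
  let flag := decide (uniq.length ≠ sortedtuplst.length)
  let checked := (PySem.List.enumerate uniq).foldl
    (fun (d : PySem.Dict (List Int) Int) p => d.insert p.2 (p.1 + 1)) PySem.Dict.empty
  let irm := sortedtuplst.foldl
    (fun (d : PySem.Dict Int Int) t =>
      d.insert t.2 (((PySem.List.index? uniq t.1).getD 0 : Int) + 1)) PySem.Dict.empty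
  (flag, irm.items, checked.items)

-- ===== PRECONDITION & SPEC =====
def Spec_DC3_check_radix (sortedtuplst : List (List Int × Int)) (out : Bool × (List (Int × Int)) × (List (List Int × Int))) : Prop := out = DC3_check_radix_alt sortedtuplst
instance (sortedtuplst : List (List Int × Int)) (out : Bool × (List (Int × Int)) × (List (List Int × Int))) : Decidable (Spec_DC3_check_radix sortedtuplst out) := by unfold Spec_DC3_check_radix; infer_instance

-- ===== CLAIM (what is proved, stated in full; the proofs are below) =====
def Claim_equal_DC3_check_radix : Prop := ∀ (sortedtuplst : List (List Int × Int)), Dom_DC3_check_radix sortedtuplst → Spec_DC3_check_radix sortedtuplst (DC3_check_radix sortedtuplst)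

-- ===== LEMMAS AND PROOFS =====

-- the dict B's ranking pass builds from a dedup list u: u[i] ↦ i+1
def dOf (u : List (List Int)) : PySem.Dict (List Int) Int :=
  (PySem.List.enumerate u).foldl (fun d p => d.insert p.2 (p.1 + 1)) PySem.Dict.empty

-- the dedup list after extending u by the keys of l (B's uniq when u = [])
def ext (u : List (List Int)) (l : List (List Int × Int)) : List (List Int) :=
  l.foldl (fun u t => PySem.Set.add u t.1) u

theorem dOf_append (u : List (List Int)) (k : List Int) :
    dOf (u ++ [k]) = (dOf u).insert k ((u.length : Int) + 1) := by
  simp [dOf, PySem.List.enumerate_append, List.foldl_append, PySem.List.enumerate]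

theorem contains_dOf (u : List (List Int)) (k : List Int) :
    (dOf u).contains k = decide (k ∈ u) := by
  induction u using List.reverseRecOn with
  | nil => simp [dOf]
  | append_singleton u x ih =>
      rw [dOf_append]
      by_cases h : k = x
      · subst h; simp
      · simp [PySem.Dict.contains_insert, h, ih]

theorem getD_dOf (u : List (List Int)) (k : List Int) (hnd : u.Nodup) (hk : k ∈ u) :
    (dOf u).getD k 0 = ((PySem.List.index? u k).getD 0 : Int) + 1 := by
  induction u using List.reverseRecOn with
  | nil => simp at hk
  | append_singleton u x ih =>
      rw [dOf_append]
      rcases List.nodup_append.mp hnd with ⟨hndu, -, hdisj⟩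
      by_cases h : k = x
      · subst h
        have hku : k ∉ u := fun hm => hdisj k hm k (List.mem_singleton_self k) rfl
        rw [PySem.Dict.getD_insert_self, PySem.List.index?_append_singleton_self u k hku]
        simp
      · have hku : k ∈ u := by
          rcases List.mem_append.mp hk with h1 | h2
          · exact h1
          · exact absurd (List.mem_singleton.mp h2) h
        rw [PySem.Dict.getD_insert_of_ne _ _ _ h, ih hndu hku,
          PySem.List.index?_append_of_mem _ hku]

theorem index?_ext_of_mem (u : List (List Int)) (l : List (List Int × Int)) (k : List Int)
    (hk : k ∈ u) : PySem.List.index? (ext u l) k = PySem.List.index? u k := by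
  induction l generalizing u with
  | nil => rfl
  | cons t tl ih =>
      show PySem.List.index? (ext (PySem.Set.add u t.1) tl) k = _
      rw [ih _ ((PySem.Set.mem_add _ _ _).mpr (Or.inl hk))]
      rw [PySem.Set.add_eq_ite]
      by_cases h : t.1 ∈ u
      · simp [h]
      · simp only [h, if_false]
        exact PySem.List.index?_append_of_mem _ hk

theorem length_ext_le (u : List (List Int)) (l : List (List Int × Int)) :
    (ext u l).length ≤ u.length + l.length := by
  induction l generalizing u with
  | nil => simp [ext]
  | cons t tl ih =>
      have h := ih (PySem.Set.add u t.1)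
      have h2 : (PySem.Set.add u t.1).length ≤ u.length + 1 := by
        rw [PySem.Set.add_eq_ite]; split_ifs <;> simp
      show (ext (PySem.Set.add u t.1) tl).length ≤ _
      simp only [List.length_cons]
      omega

-- main loop invariant: A's fold from a dedup state u equals B's three results on ext u l
theorem main_inv (l : List (List Int × Int)) (u : List (List Int))
    (irm : PySem.Dict Int Int) (flag : Bool) (hnd : u.Nodup) :
    l.foldl stepA (dOf u, irm, (u.length : Int) + 1, flag) =
      (dOf (ext u l),
       l.foldl (fun d t =>
         d.insert t.2 (((PySem.List.index? (ext u l) t.1).getD 0 : Int) + 1)) irm,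
       ((ext u l).length : Int) + 1,
       flag || decide ((ext u l).length ≠ u.length + l.length)) := by
  induction l generalizing u irm flag with
  | nil => simp [ext]
  | cons t tl ih =>
      by_cases hm : t.1 ∈ u
      · -- duplicate key: A takes the else branch
        have hco : ¬ ((dOf u).contains t.1 = false) := by
          simp [contains_dOf, hm]
        have hU : ext u (t :: tl) = ext u tl := by
          show ext (PySem.Set.add u t.1) tl = _
          rw [PySem.Set.add_of_mem hm]
        have hlen := length_ext_le u tl
        have hidx := index?_ext_of_mem u tl t.1 hm
        rw [List.foldl_cons,
          show stepA (dOf u, irm, (u.length : Int) + 1, flag) t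
            = (dOf u, irm.insert t.2 ((dOf u).getD t.1 0), (u.length : Int) + 1, true)
            from by simp [stepA, hco]]
        rw [ih u _ true hnd]
        rw [List.foldl_cons, hU]
        rw [getD_dOf u t.1 hnd hm, ← hidx]
        have hflag : (ext u tl).length ≠ u.length + (tl.length + 1) := by omega
        simp [hflag, List.length_cons]
      · -- fresh key: A takes the then branch
        have hco : (dOf u).contains t.1 = false := by
          simp [contains_dOf, hm]
        have hndu : (u ++ [t.1]).Nodup := by
          rw [List.nodup_append]
          exact ⟨hnd, List.nodup_singleton _, fun a ha b hb => by
            rw [List.mem_singleton] at hb; subst hb; exact fun h => hm (h ▸ ha)⟩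
        have hadd : PySem.Set.add u t.1 = u ++ [t.1] := PySem.Set.add_of_not_mem hm
        have hU : ext u (t :: tl) = ext (u ++ [t.1]) tl := by
          show ext (PySem.Set.add u t.1) tl = _
          rw [hadd]
        rw [List.foldl_cons,
          show stepA (dOf u, irm, (u.length : Int) + 1, flag) t
            = ((dOf u).insert t.1 ((u.length : Int) + 1),
               irm.insert t.2 ((u.length : Int) + 1),
               (u.length : Int) + 1 + 1, flag)
            from by simp [stepA, hco]]
        rw [← dOf_append]
        have hcast : ((u.length : Int) + 1 + 1) = (((u ++ [t.1]).length : Int) + 1) := by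
          simp
        rw [hcast]
        rw [ih (u ++ [t.1]) _ flag hndu]
        rw [List.foldl_cons, hU]
        have hmem : t.1 ∈ u ++ [t.1] := List.mem_append_right _ (List.mem_singleton_self _)
        have hidx : ((PySem.List.index? (ext (u ++ [t.1]) tl) t.1).getD 0 : Int) + 1
            = (u.length : Int) + 1 := by
          rw [index?_ext_of_mem _ _ _ hmem, PySem.List.index?_append_singleton_self u t.1 hm]
          simp
        rw [hidx]
        have hlen : (u ++ [t.1]).length + tl.length = u.length + (t :: tl).length := by
          simp [List.length_append, List.length_cons]; omega
        rw [hlen]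

-- ===== VERDICT (by name: the statement is the Claim_ definition above) =====
theorem DC3_check_radix_spec : Claim_equal_DC3_check_radix := by
  intro l _
  unfold Spec_DC3_check_radix DC3_check_radix DC3_check_radix_alt
  have hU : PySem.List.dedup (l.map (fun t => t.1)) = ext [] l := by
    rw [PySem.List.dedup_eq_ofList, ← PySem.Set.update_nil_left,
      PySem.Set.update_map_eq_foldl_add]
    rfl
  have h := main_inv l [] PySem.Dict.empty false List.nodup_nil
  rw [show dOf [] = PySem.Dict.empty from rfl] at h
  simp only [List.length_nil, Nat.cast_zero, zero_add, Bool.false_or] at h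
  rw [hU]
  rw [h]
  rfl
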